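-- pv_equiv track=rewrite | github.com/Elaina10172004/VRP_Agent | local_search/search_utils.py | candidate_route_indices_for_nodes
-- ===== SOURCE A (Python) =====
-- def candidate_route_indices_for_nodes(
--     routes: list[list[int]],
--     nodes: list[int] | tuple[int, ...],
--     neighbor_lists: list[list[int]] | None,
--     force_include: list[int] | tuple[int, ...] = (),
-- ) -> list[int]:
--     if not routes:
--         return []
--     if not neighbor_lists:
--         return list(range(len(routes)))
--
--     node_set = {int(node) for node in nodes}
--     expanded = set(node_set)
--     for node in node_set:
--         if 0 <= node < len(neighbor_lists):
--             expanded.update(neighbor_lists[node])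
--
--     candidates = {int(index) for index in force_include if 0 <= int(index) < len(routes)}
--     for route_index, route in enumerate(routes):
--         if any(customer in expanded for customer in route):
--             candidates.add(route_index)
--
--     return sorted(candidates) if candidates else list(range(len(routes)))
-- ===== SOURCE B (Python) =====
-- def candidate_route_indices_for_nodes(
--     routes,
--     nodes,
--     neighbor_lists,
--     force_include=(),
-- ):
--     if not routes:
--         return []
--     if not neighbor_lists:
--         return list(range(len(routes)))
--
--     node_set = {int(node) for node in nodes}
--     expanded = set(node_set)
--     for node in node_set:
--         if 0 <= node < len(neighbor_lists):
--             expanded.update(neighbor_lists[node])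
--
--     # inverted index: customer -> route indices whose route contains it
--     index = {}
--     for route_index, route in enumerate(routes):
--         for customer in route:
--             index.setdefault(customer, []).append(route_index)
--
--     candidates = {int(i) for i in force_include if 0 <= int(i) < len(routes)}
--     for node in expanded:
--         for route_index in index.get(node, ()):
--             candidates.add(route_index)
--
--     return sorted(candidates) if candidates else list(range(len(routes)))
-- ===== Notes on version B (the rewrite author's own statement) =====
-- stated objective: alternative
-- what changed: B replaces A's per-route membership scan against the expanded node set with an inverted index built once (customer -> route indices), then collects candidates by looking up each expanded node in that index.
import Mathlib
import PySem

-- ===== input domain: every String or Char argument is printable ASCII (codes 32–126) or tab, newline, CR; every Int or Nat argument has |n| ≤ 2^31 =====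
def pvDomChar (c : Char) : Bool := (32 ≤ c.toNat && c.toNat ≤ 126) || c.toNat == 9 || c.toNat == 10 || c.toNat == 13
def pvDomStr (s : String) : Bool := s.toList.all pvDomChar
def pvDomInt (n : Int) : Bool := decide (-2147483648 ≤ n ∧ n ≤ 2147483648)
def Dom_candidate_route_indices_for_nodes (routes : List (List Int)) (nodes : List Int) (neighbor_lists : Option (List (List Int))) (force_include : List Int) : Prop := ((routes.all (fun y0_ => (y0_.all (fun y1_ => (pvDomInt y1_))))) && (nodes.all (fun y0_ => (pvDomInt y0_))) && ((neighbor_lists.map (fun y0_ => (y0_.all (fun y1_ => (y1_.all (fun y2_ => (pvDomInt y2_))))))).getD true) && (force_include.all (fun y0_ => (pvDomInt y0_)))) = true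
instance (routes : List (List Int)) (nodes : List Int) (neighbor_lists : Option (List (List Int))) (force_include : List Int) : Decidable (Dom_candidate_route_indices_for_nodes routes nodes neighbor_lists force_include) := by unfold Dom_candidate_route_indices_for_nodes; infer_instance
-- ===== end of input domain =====

-- B builds an inverted index (customer -> route indices) once and unions index entries over the
-- expanded node set, instead of A's per-route membership scan; objective: alternative decomposition.

-- ===== PORT A =====
-- expanded node set: the node set plus, for each in-range node, its neighbor list
def pvExpandedA (nodes : List Int) (nls : List (List Int)) : PySem.Set Int :=
  (PySem.Set.ofList nodes).foldl
    (fun e node =>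
      if 0 ≤ node ∧ node < (nls.length : Int) then PySem.Set.update e (PySem.List.pyGetD nls node [])
      else e)
    (PySem.Set.ofList (PySem.Set.ofList nodes))

def candidate_route_indices_for_nodes (routes : List (List Int)) (nodes : List Int) (neighbor_lists : Option (List (List Int))) (force_include : List Int) : List Int :=
  if routes = [] then []
  else
    match neighbor_lists with
    | none => PySem.List.pyRange 0 (routes.length : Int) 1
    | some nls =>
      if nls = [] then PySem.List.pyRange 0 (routes.length : Int) 1
      else
        let expanded := pvExpandedA nodes nls
        let seed : PySem.Set Int :=
          PySem.Set.ofList (force_include.filter (fun i => decide (0 ≤ i) && decide (i < (routes.length : Int))))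
        let candidates :=
          (PySem.List.enumerate routes).foldl
            (fun s pr => if pr.2.any (fun c => PySem.Set.contains expanded c) then PySem.Set.add s pr.1 else s)
            seed
        if candidates = [] then PySem.List.pyRange 0 (routes.length : Int) 1
        else PySem.List.sorted candidates (fun x => x) false

-- ===== PORT B =====
-- inverted index: customer -> list of route indices whose route contains it
def pvIndexB (routes : List (List Int)) : PySem.Dict Int (List Int) :=
  (PySem.List.enumerate routes).foldl
    (fun d pr => pr.2.foldl (fun d c => d.modify c [] (fun l => l ++ [pr.1])) d)
    PySem.Dict.empty

def candidate_route_indices_for_nodes_alt (routes : List (List Int)) (nodes : List Int) (neighbor_lists : Option (List (List Int))) (force_include : List Int) : List Int :=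
  if routes = [] then []
  else
    match neighbor_lists with
    | none => PySem.List.pyRange 0 (routes.length : Int) 1
    | some nls =>
      if nls = [] then PySem.List.pyRange 0 (routes.length : Int) 1
      else
        let expanded := pvExpandedA nodes nls
        let index := pvIndexB routes
        let candidates :=
          expanded.foldl
            (fun s node => (index.getD node []).foldl (fun s ri => PySem.Set.add s ri) s)
            (PySem.Set.ofList (force_include.filter (fun i => decide (0 ≤ i) && decide (i < (routes.length : Int)))))
        if candidates = [] then PySem.List.pyRange 0 (routes.length : Int) 1
        else PySem.List.sorted candidates (fun x => x) false

-- ===== PRECONDITION & SPEC =====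
def Spec_candidate_route_indices_for_nodes (routes : List (List Int)) (nodes : List Int) (neighbor_lists : Option (List (List Int))) (force_include : List Int) (out : List Int) : Prop := out = candidate_route_indices_for_nodes_alt routes nodes neighbor_lists force_include
instance (routes : List (List Int)) (nodes : List Int) (neighbor_lists : Option (List (List Int))) (force_include : List Int) (out : List Int) : Decidable (Spec_candidate_route_indices_for_nodes routes nodes neighbor_lists force_include out) := by unfold Spec_candidate_route_indices_for_nodes; infer_instance

-- ===== CLAIM (what is proved, stated in full; the proofs are below) =====
def Claim_equal_candidate_route_indices_for_nodes : Prop := ∀ (routes : List (List Int)) (nodes : List Int) (neighbor_lists : Option (List (List Int))) (force_include : List Int), Dom_candidate_route_indices_for_nodes routes nodes neighbor_lists force_include → Spec_candidate_route_indices_for_nodes routes nodes neighbor_lists force_include (candidate_route_indices_for_nodes routes nodes neighbor_lists force_include)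

-- ===== LEMMAS AND PROOFS =====

-- membership in A's candidate fold
theorem memA (l : List (Int × List Int)) (s0 : PySem.Set Int) (p : Int × List Int → Bool) (x : Int) :
    x ∈ l.foldl (fun s pr => if p pr then PySem.Set.add s pr.1 else s) s0 ↔
      x ∈ s0 ∨ ∃ pr ∈ l, p pr ∧ x = pr.1 := by
  induction l generalizing s0 with
  | nil => simp
  | cons hd tl ih =>
    simp only [List.foldl_cons, ih, List.mem_cons]
    by_cases h : p hd
    · simp only [h, if_pos, PySem.Set.mem_add]
      simp only [or_and_right, exists_or, exists_eq_left]
      tauto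
    · simp only [h, if_neg, Bool.false_eq_true, not_false_iff]
      simp only [or_and_right, exists_or, exists_eq_left]
      simp [h]

theorem nodupA (l : List (Int × List Int)) (s0 : PySem.Set Int) (p : Int × List Int → Bool)
    (h : s0.Nodup) :
    (l.foldl (fun s pr => if p pr then PySem.Set.add s pr.1 else s) s0).Nodup := by
  induction l generalizing s0 with
  | nil => exact h
  | cons hd tl ih =>
    rw [List.foldl_cons]
    by_cases hp : p hd
    · rw [if_pos hp]; exact ih _ (PySem.Set.nodup_add _ _ h)
    · rw [if_neg hp]; exact ih _ h

-- membership in B's candidate fold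
theorem memB (l : List Int) (s0 : PySem.Set Int) (g : Int → List Int) (x : Int) :
    x ∈ l.foldl (fun s n => (g n).foldl (fun s ri => PySem.Set.add s ri) s) s0 ↔
      x ∈ s0 ∨ ∃ n ∈ l, x ∈ g n := by
  induction l generalizing s0 with
  | nil => simp
  | cons hd tl ih =>
    rw [List.foldl_cons]
    rw [ih]
    simp only [PySem.Set.mem_foldl_add (f := fun (b : Int) => b), exists_eq_right',
      List.mem_cons, or_and_right, exists_or, exists_eq_left]
    tauto

theorem nodupB (l : List Int) (s0 : PySem.Set Int) (g : Int → List Int) (h : s0.Nodup) :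
    (l.foldl (fun s n => (g n).foldl (fun s ri => PySem.Set.add s ri) s) s0).Nodup := by
  induction l generalizing s0 with
  | nil => exact h
  | cons hd tl ih =>
    exact ih _ (PySem.Set.nodup_update _ _ h)

-- the inverted index of B, characterised
theorem mem_index (routes : List (List Int)) (c x : Int) :
    x ∈ (pvIndexB routes).getD c [] ↔ ∃ pr ∈ PySem.List.enumerate routes, c ∈ pr.2 ∧ x = pr.1 := by
  have hflat : ∀ (l : List (Int × List Int)) (d : PySem.Dict Int (List Int)),
      l.foldl (fun d pr => pr.2.foldl (fun d c => d.modify c [] (fun ll => ll ++ [pr.1])) d) d =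
      (l.flatMap (fun pr => pr.2.map (fun cu => (cu, pr.1)))).foldl
        (fun d p => d.modify p.1 [] (fun ll => ll ++ [p.2])) d := by
    intro l
    induction l with
    | nil => intro d; rfl
    | cons hd tl ih =>
      intro d
      simp only [List.foldl_cons, List.flatMap_cons, List.foldl_append, ih, List.foldl_map]
  unfold pvIndexB
  rw [hflat, PySem.Dict.getD_foldl_modify_append]
  simp only [PySem.Dict.getD_empty, List.nil_append, List.mem_map, List.mem_filter,
    List.mem_flatMap, beq_iff_eq]
  constructor
  · rintro ⟨p, ⟨⟨pr, hpr, cu, hcu, rfl⟩, hc⟩, rfl⟩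
    rw [show ((cu, pr.1) : Int × Int).1 = cu from rfl] at hc
    subst hc
    exact ⟨pr, hpr, hcu, rfl⟩
  · rintro ⟨pr, hpr, hc, rfl⟩
    exact ⟨(c, pr.1), ⟨⟨pr, hpr, ⟨c, hc, rfl⟩⟩, rfl⟩, rfl⟩

-- ===== VERDICT (by name: the statement is the Claim_ definition above) =====
theorem candidate_route_indices_for_nodes_spec : Claim_equal_candidate_route_indices_for_nodes := by
  intro routes nodes neighbor_lists force_include _
  unfold Spec_candidate_route_indices_for_nodes
  unfold candidate_route_indices_for_nodes candidate_route_indices_for_nodes_alt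
  by_cases hr : routes = []
  · simp [hr]
  simp only [if_neg hr]
  cases neighbor_lists with
  | none => rfl
  | some nls =>
    by_cases hn : nls = []
    · simp [hn]
    simp only [if_neg hn]
    set expanded := pvExpandedA nodes nls with hexp
    set seed : PySem.Set Int :=
      PySem.Set.ofList (force_include.filter (fun i => decide (0 ≤ i) && decide (i < (routes.length : Int)))) with hseed
    set cA := (PySem.List.enumerate routes).foldl
        (fun s pr => if pr.2.any (fun c => PySem.Set.contains expanded c) then PySem.Set.add s pr.1 else s)
        seed with hcA
    set cB := expanded.foldl
        (fun s node => ((pvIndexB routes).getD node []).foldl (fun s ri => PySem.Set.add s ri) s)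
        seed with hcB
    have hmem : ∀ x, x ∈ cA ↔ x ∈ cB := by
      intro x
      rw [hcA, hcB,
        memA (PySem.List.enumerate routes) seed (fun pr => pr.2.any fun c => expanded.contains c) x,
        memB expanded seed (fun node => (pvIndexB routes).getD node []) x]
      apply or_congr Iff.rfl
      constructor
      · rintro ⟨pr, hpr, hany, rfl⟩
        simp only [List.any_eq_true] at hany
        obtain ⟨c, hc, hcexp⟩ := hany
        rw [PySem.Set.contains_iff] at hcexp
        exact ⟨c, hcexp, (mem_index routes c pr.1).2 ⟨pr, hpr, hc, rfl⟩⟩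
      · rintro ⟨n, hn2, hx⟩
        obtain ⟨pr, hpr, hc, rfl⟩ := (mem_index routes n x).1 hx
        refine ⟨pr, hpr, ?_, rfl⟩
        simp only [List.any_eq_true]
        exact ⟨n, hc, (PySem.Set.contains_iff _ _).2 hn2⟩
    have hperm : cA.Perm cB := by
      rw [List.perm_ext_iff_of_nodup]
      · exact hmem
      · rw [hcA]
        exact nodupA _ _ _ (PySem.Set.nodup_ofList _)
      · rw [hcB]
        exact nodupB _ _ _ (PySem.Set.nodup_ofList _)
    have hnil : cA = [] ↔ cB = [] := by
      constructor <;> intro h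
      · rw [h] at hperm; exact hperm.symm.eq_nil
      · rw [h] at hperm; exact hperm.eq_nil
    by_cases hA : cA = []
    · simp [hA, hnil.1 hA]
    · have hB : cB ≠ [] := fun h => hA (hnil.2 h)
      simp only [if_neg hA, if_neg hB]
      exact (PySem.List.sorted_id_eq_sorted_id_iff_perm cA cB).2 hperm
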